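-- pv_equiv track=rewrite | github.com/streamlit/streamlit | lib/streamlit/NotebookRunner.py | _split_cells_at_ellipses
-- ===== SOURCE A (Python) =====
-- def _split_cells_at_ellipses(body):
--     lines = body.split('\n')
--     current_cell = []
--     cells = []
--
--     for i, line in enumerate(lines):
--         if line == '...':
--             cells.append('\n'.join(current_cell))
--             current_cell = [
--                 '\n' * i # Add blank lines to make errors point to right line of code.
--             ]
--         else:
--             current_cell.append(line)
--
--     cells.append('\n'.join(current_cell))
--
--     return cells
-- ===== SOURCE B (Python) =====
-- def _split_cells_at_ellipses(body):
--     lines = body.split('\n')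
--     delims = [i for i, line in enumerate(lines) if line == '...']
--     cells = ['\n'.join(lines[:delims[0]] if delims else lines)]
--     for d, nxt in zip(delims, delims[1:] + [len(lines)]):
--         cells.append('\n'.join(['\n' * d] + lines[d + 1:nxt]))
--     return cells
-- ===== Notes on version B (the rewrite author's own statement) =====
-- stated objective: alternative
-- what changed: A builds cells in one accumulating pass over enumerate(lines) with a mutable current-cell list; B first collects the indices of the ellipsis delimiter lines, then constructs each cell directly as a slice of the line list (first cell = lines up to the first delimiter, each later cell = newline padding plus the slice between consecutive delimiters).
import Mathlib
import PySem

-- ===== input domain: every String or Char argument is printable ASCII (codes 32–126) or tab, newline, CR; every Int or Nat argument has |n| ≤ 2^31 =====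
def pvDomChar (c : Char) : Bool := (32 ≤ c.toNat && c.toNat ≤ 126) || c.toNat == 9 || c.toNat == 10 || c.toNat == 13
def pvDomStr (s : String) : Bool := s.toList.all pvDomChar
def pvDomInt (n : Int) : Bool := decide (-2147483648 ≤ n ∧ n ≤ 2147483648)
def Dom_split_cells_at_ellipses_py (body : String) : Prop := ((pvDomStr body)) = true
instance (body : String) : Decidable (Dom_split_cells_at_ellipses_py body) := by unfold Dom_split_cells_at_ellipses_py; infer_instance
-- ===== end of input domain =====

-- B replaces A's single accumulating pass by an index-then-slice decomposition (collect delimiter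
-- indices, then build each cell from a slice); objective: alternative structure, same cost.

-- '\n' * i for a Python int i ≥ 0 (exact: enumerate indices are nonnegative)
def pvNl (i : Int) : String := String.ofList (List.replicate i.toNat '\n')

-- body.split('\n') (sep ≠ "", so Python's str.split with an explicit separator = Chars.splitOn; exact)
def pvSplitNl (body : String) : List String :=
  (PySem.Chars.splitOn body.toList ['\n']).map String.ofList

-- ===== PORT A =====
def split_cells_at_ellipses_py (body : String) : List String :=
  let lines := pvSplitNl body
  let st := (PySem.List.enumerate lines 0).foldl
    (fun (st : List String × List String) il =>
      if il.2 = "..." then ([pvNl il.1], st.2 ++ [PySem.Str.join "\n" st.1])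
      else (st.1 ++ [il.2], st.2))
    ([], [])
  st.2 ++ [PySem.Str.join "\n" st.1]

-- ===== PORT B =====
def split_cells_at_ellipses_py_alt (body : String) : List String :=
  let lines := pvSplitNl body
  let delims := (PySem.List.enumerate lines 0).filterMap
    (fun p => if p.2 = "..." then some p.1 else none)
  let first := PySem.Str.join "\n"
    (match delims with
     | [] => lines
     | d :: _ => PySem.List.slice lines none (some d))
  let rest := (delims.zip (delims.tail ++ [(lines.length : Int)])).map
    (fun p => PySem.Str.join "\n" (pvNl p.1 :: PySem.List.slice lines (some (p.1 + 1)) (some p.2)))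
  first :: rest

-- ===== PRECONDITION & SPEC =====
def Spec_split_cells_at_ellipses_py (body : String) (out : List String) : Prop := out = split_cells_at_ellipses_py_alt body
instance (body : String) (out : List String) : Decidable (Spec_split_cells_at_ellipses_py body out) := by unfold Spec_split_cells_at_ellipses_py; infer_instance

-- ===== CLAIM (what is proved, stated in full; the proofs are below) =====
def Claim_equal_split_cells_at_ellipses_py : Prop := ∀ (body : String), Dom_split_cells_at_ellipses_py body → Spec_split_cells_at_ellipses_py body (split_cells_at_ellipses_py body)

-- ===== LEMMAS AND PROOFS =====

-- A's loop as a structural recursion (absolute start index s, current cell cur)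
def pvFA (s : Nat) (cur : List String) : List String → List String
  | [] => [PySem.Str.join "\n" cur]
  | l :: ls =>
    if l = "..." then PySem.Str.join "\n" cur :: pvFA (s + 1) [pvNl (s : Int)] ls
    else pvFA (s + 1) (cur ++ [l]) ls

-- local (Nat) indices of "..." lines
def pvIdxs : List String → List Nat
  | [] => []
  | l :: ls => if l = "..." then 0 :: (pvIdxs ls).map (· + 1) else (pvIdxs ls).map (· + 1)

-- the cell built for a delimiter at local index p.1 with next boundary p.2, lines ls, global offset s
def pvCell (s : Nat) (ls : List String) (p : Nat × Nat) : String :=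
  PySem.Str.join "\n" (pvNl ((s + p.1 : Nat) : Int) :: (ls.drop (p.1 + 1)).take (p.2 - (p.1 + 1)))

def pvStep (st : List String × List String) (il : Int × String) : List String × List String :=
  if il.2 = "..." then ([pvNl il.1], st.2 ++ [PySem.Str.join "\n" st.1])
  else (st.1 ++ [il.2], st.2)

lemma pvFA_fold (ls : List String) : ∀ (s : Nat) (cur cells : List String),
    ((PySem.List.enumerate ls (s : Int)).foldl pvStep (cur, cells)).2
      ++ [PySem.Str.join "\n" ((PySem.List.enumerate ls (s : Int)).foldl pvStep (cur, cells)).1]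
    = cells ++ pvFA s cur ls := by
  induction ls with
  | nil => intro s cur cells; simp [PySem.List.enumerate_nil, pvFA]
  | cons l ls ih =>
    intro s cur cells
    rw [PySem.List.enumerate_cons]
    have hc : (s : Int) + 1 = ((s + 1 : Nat) : Int) := by push_cast; ring
    simp only [List.foldl_cons, pvStep]
    by_cases h : l = "..."
    · rw [if_pos h, hc, ih, pvFA, if_pos h]
      simp
    · rw [if_neg h, hc, ih, pvFA, if_neg h]

lemma pvDelims (ls : List String) : ∀ (s : Nat),
    (PySem.List.enumerate ls (s : Int)).filterMap
      (fun p => if p.2 = "..." then some p.1 else none)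
    = (pvIdxs ls).map (fun d => ((s + d : Nat) : Int)) := by
  induction ls with
  | nil => intro s; simp [PySem.List.enumerate_nil, pvIdxs]
  | cons l ls ih =>
    intro s
    rw [PySem.List.enumerate_cons]
    have hc : (s : Int) + 1 = ((s + 1 : Nat) : Int) := by push_cast; ring
    simp only [List.filterMap_cons]
    by_cases h : l = "..."
    · rw [if_pos h, hc, ih, pvIdxs, if_pos h]
      simp only [List.map_cons, List.map_map]
      rw [List.cons.injEq]
      constructor
      · push_cast; ring
      · apply List.map_congr_left; intro d _; simp only [Function.comp_apply]; push_cast; ring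
    · rw [if_neg h, hc, ih, pvIdxs, if_neg h, List.map_map]
      apply List.map_congr_left; intro d _; simp only [Function.comp_apply]; push_cast; ring

lemma pvCell_shift (s : Nat) (l : String) (ls : List String) (d n : Nat) :
    pvCell s (l :: ls) (d + 1, n + 1) = pvCell (s + 1) ls (d, n) := by
  simp only [pvCell, List.drop_succ_cons]
  have h1 : s + (d + 1) = s + 1 + d := by ring
  have h2 : n + 1 - (d + 1 + 1) = n - (d + 1) := by omega
  rw [h1, h2]

lemma pvShift (ds : List Nat) (s : Nat) (l : String) (ls : List String) :
    ((ds.map (· + 1)).zip ((ds.tail.map (· + 1)) ++ [ls.length + 1])).map (pvCell s (l :: ls))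
    = (ds.zip (ds.tail ++ [ls.length])).map (pvCell (s + 1) ls) := by
  induction ds with
  | nil => simp
  | cons d rest ih =>
    cases rest with
    | nil => simp [pvCell_shift]
    | cons e rest' =>
      simp only [List.map_cons, List.tail_cons, List.cons_append, List.zip_cons_cons,
        List.map_cons] at ih ⊢
      rw [pvCell_shift]
      exact congrArg _ ih

lemma pvMain (ls : List String) : ∀ (s : Nat) (cur : List String),
    pvFA s cur ls
    = PySem.Str.join "\n" (cur ++ ls.take ((pvIdxs ls).headD ls.length)) ::
      ((pvIdxs ls).zip ((pvIdxs ls).tail ++ [ls.length])).map (pvCell s ls) := by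
  induction ls with
  | nil => intro s cur; simp [pvFA, pvIdxs]
  | cons l ls ih =>
    intro s cur
    by_cases h : l = "..."
    · rw [pvFA, if_pos h, ih, pvIdxs, if_pos h]
      simp only [List.headD_cons, List.take_zero, List.append_nil, List.tail_cons,
        List.length_cons]
      cases hds : pvIdxs ls with
      | nil =>
        simp [pvCell, List.take_length]
      | cons d rest =>
        simp only [List.map_cons, List.cons_append, List.zip_cons_cons, List.tail_cons]
        rw [List.cons.injEq]
        refine ⟨rfl, ?_⟩
        rw [List.cons.injEq]
        constructor
        · simp [pvCell]
        · have hsh := pvShift (d :: rest) s l ls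
          simp only [List.tail_cons, List.map_cons] at hsh
          exact hsh.symm
    · rw [pvFA, if_neg h, ih, pvIdxs, if_neg h]
      have htail : ((pvIdxs ls).map (· + 1)).tail = (pvIdxs ls).tail.map (· + 1) := by
        cases pvIdxs ls <;> simp
      rw [List.cons.injEq]
      constructor
      · have hhead : ((pvIdxs ls).map (· + 1)).headD ((l :: ls).length)
            = (pvIdxs ls).headD ls.length + 1 := by
          cases pvIdxs ls <;> simp
        rw [hhead, List.take_succ_cons]
        simp
      · rw [htail, List.length_cons, pvShift]

-- B's cell function matches pvCell at offset 0
lemma pvB_cell (ls : List String) (d n : Nat) :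
    PySem.Str.join "\n" (pvNl ((d : Nat) : Int)
      :: PySem.List.slice ls (some (((d : Nat) : Int) + 1)) (some ((n : Nat) : Int)))
    = pvCell 0 ls (d, n) := by
  have h1 : ((d : Nat) : Int) + 1 = (((d + 1 : Nat)) : Int) := by push_cast; ring
  rw [h1, PySem.List.slice_natCast]
  simp [pvCell]

-- ===== VERDICT (by name: the statement is the Claim_ definition above) =====
theorem split_cells_at_ellipses_py_spec : Claim_equal_split_cells_at_ellipses_py := by
  intro body _
  unfold Spec_split_cells_at_ellipses_py
  unfold split_cells_at_ellipses_py split_cells_at_ellipses_py_alt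
  simp only []
  generalize pvSplitNl body = ls
  -- A side
  have hA := pvFA_fold ls 0 [] []
  rw [show ((0 : Nat) : Int) = (0 : Int) from rfl] at hA
  have hA' : ((PySem.List.enumerate ls 0).foldl pvStep ([], [])).2
      ++ [PySem.Str.join "\n" (((PySem.List.enumerate ls 0).foldl pvStep ([], [])).1)]
      = pvFA 0 [] ls := by simpa using hA
  rw [show (fun (st : List String × List String) (il : Int × String) =>
        if il.2 = "..." then ([pvNl il.1], st.2 ++ [PySem.Str.join "\n" st.1])
        else (st.1 ++ [il.2], st.2)) = pvStep from rfl, hA', pvMain ls 0 []]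
  have hd := pvDelims ls 0
  rw [show ((0 : Nat) : Int) = (0 : Int) from rfl] at hd
  simp only [Nat.zero_add] at hd
  rw [hd, List.cons.injEq]
  constructor
  · cases hds : pvIdxs ls with
    | nil => simp
    | cons d rest => simp [PySem.List.slice_to_natCast]
  · have htail : ((pvIdxs ls).map (fun d => ((d : Nat) : Int))).tail
        = (pvIdxs ls).tail.map (fun d => ((d : Nat) : Int)) := by
      cases pvIdxs ls <;> simp
    have happ : (pvIdxs ls).tail.map (fun d => ((d : Nat) : Int)) ++ [(ls.length : Int)]
        = ((pvIdxs ls).tail ++ [ls.length]).map (fun d => ((d : Nat) : Int)) := by simp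
    rw [htail, happ, List.zip_map, List.map_map]
    apply List.map_congr_left
    intro p _
    have := (pvB_cell ls p.1 p.2).symm
    simpa using this
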